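-- pv_equiv track=rewrite | github.com/unslothai/unsloth | studio/backend/plugins/data-designer-unstructured-seed/src/data_designer_unstructured_seed/chunking.py | _round_robin_preview
-- ===== SOURCE A (Python) =====
-- def _round_robin_preview(
--     rows: list[dict[str, str]],
--     preview_size: int,
-- ) -> list[dict[str, str]]:
--     """Pick preview rows round-robin across source files so every file is represented."""
--     if not rows or preview_size <= 0:
--         return []
--
--     # Group rows by source_file, preserving order of first appearance
--     from collections import OrderedDict
--
--     grouped: OrderedDict[str, list[dict[str, str]]] = OrderedDict()
--     for row in rows:
--         key = row.get("source_file", "")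
--         if key not in grouped:
--             grouped[key] = []
--         grouped[key].append(row)
--
--     result: list[dict[str, str]] = []
--     iterators = [iter(chunks) for chunks in grouped.values()]
--     while len(result) < preview_size and iterators:
--         exhausted: list[int] = []
--         for i, it in enumerate(iterators):
--             if len(result) >= preview_size:
--                 break
--             val = next(it, None)
--             if val is not None:
--                 result.append(val)
--             else:
--                 exhausted.append(i)
--         for i in reversed(exhausted):
--             iterators.pop(i)
--
--     return result
-- ===== SOURCE B (Python) =====
-- def _round_robin_preview(
--     rows: list[dict[str, str]],
--     preview_size: int,
-- ) -> list[dict[str, str]]: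
--     """Pick preview rows round-robin across source files so every file is represented."""
--     if not rows or preview_size <= 0:
--         return []
--
--     groups: dict[str, list[dict[str, str]]] = {}
--     for row in rows:
--         groups.setdefault(row.get("source_file", ""), []).append(row)
--
--     gs = list(groups.values())
--     out: list[dict[str, str]] = []
--     for k in range(max(len(g) for g in gs)):
--         for g in gs:
--             if k < len(g):
--                 out.append(g[k])
--                 if len(out) == preview_size:
--                     return out
--     return out
-- ===== Notes on version B (the rewrite author's own statement) =====
-- stated objective: alternative
-- what changed: The iterator/exhausted/pop round-robin while-loop is replaced by an index-driven double loop: for round k, append group[k] from every group with more than k rows, returning as soon as preview_size rows are collected (grouping uses dict.setdefault instead of the membership-test-then-append).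
import Mathlib
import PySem

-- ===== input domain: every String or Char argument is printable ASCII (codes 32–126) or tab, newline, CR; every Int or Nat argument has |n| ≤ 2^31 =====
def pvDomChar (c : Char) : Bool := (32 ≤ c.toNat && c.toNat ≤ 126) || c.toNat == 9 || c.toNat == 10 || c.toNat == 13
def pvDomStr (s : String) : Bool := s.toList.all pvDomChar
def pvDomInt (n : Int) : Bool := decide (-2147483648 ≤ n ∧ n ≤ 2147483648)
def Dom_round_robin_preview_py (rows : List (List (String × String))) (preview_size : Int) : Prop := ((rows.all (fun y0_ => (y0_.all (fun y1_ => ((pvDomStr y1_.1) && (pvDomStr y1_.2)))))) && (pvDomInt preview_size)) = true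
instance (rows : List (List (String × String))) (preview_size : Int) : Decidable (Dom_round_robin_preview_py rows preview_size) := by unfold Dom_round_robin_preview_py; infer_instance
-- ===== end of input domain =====

-- B replaces A's iterator/exhausted-pop round-robin loop by an index-driven pass
-- (round k appends group[k] from each group long enough); same return value, similar cost.

-- row.get("source_file", "")
def pvRowKey (row : List (String × String)) : String :=
  PySem.Dict.getD (PySem.Dict.mk row) "source_file" ""

-- measure used only for the termination of A's while-loop (and of the proofs' helpers)
def pvMeas (its : List (List (List (String × String)))) : Nat :=
  (its.map List.length).sum + its.length

-- ===== PORT A =====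
-- the grouping loop: `if key not in grouped: grouped[key] = []` then `grouped[key].append(row)`
def pvGroupA (rows : List (List (String × String))) : PySem.Dict String (List (List (String × String))) :=
  rows.foldl (fun g row =>
    let key := pvRowKey row
    let g1 := if g.contains key then g else g.insert key []
    g1.insert key (g1.getD key [] ++ [row])) PySem.Dict.empty

-- the inner `for i, it in enumerate(iterators)` pass: each iterator is its list of remaining
-- chunks; an exhausted iterator ([]) is dropped (the reversed pops), a `break` keeps the rest.
def pvRoundA (ps : Int) (res : List (List (String × String))) :
    List (List (List (String × String))) →
      List (List (String × String)) × List (List (List (String × String)))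
  | [] => (res, [])
  | it :: rest =>
    if (res.length : Int) ≥ ps then (res, it :: rest)
    else
      match it with
      | [] => pvRoundA ps res rest
      | v :: vs =>
        let r := pvRoundA ps (res ++ [v]) rest
        (r.1, vs :: r.2)

theorem pvMeas_roundA_le (ps : Int) :
    ∀ (its : List (List (List (String × String)))) (res : List (List (String × String))),
      pvMeas (pvRoundA ps res its).2 ≤ pvMeas its := by
  intro its
  induction its with
  | nil => intro res; simp [pvRoundA, pvMeas]
  | cons it rest ih =>
    intro res
    by_cases h : (res.length : Int) ≥ ps
    · simp [pvRoundA, h]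
    · cases it with
      | nil =>
        have := ih res
        simp only [pvRoundA, if_neg h]
        simp [pvMeas] at this ⊢; omega
      | cons v vs =>
        have := ih (res ++ [v])
        simp only [pvRoundA, if_neg h]
        simp [pvMeas] at this ⊢; omega

theorem pvMeas_roundA_lt (ps : Int) (it : List (List (String × String)))
    (rest : List (List (List (String × String)))) (res : List (List (String × String)))
    (h : (res.length : Int) < ps) :
    pvMeas (pvRoundA ps res (it :: rest)).2 < pvMeas (it :: rest) := by
  have hnot : ¬ (res.length : Int) ≥ ps := by omega
  cases it with
  | nil =>
    have := pvMeas_roundA_le ps rest res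
    simp only [pvRoundA, if_neg hnot]
    simp [pvMeas] at this ⊢; omega
  | cons v vs =>
    have := pvMeas_roundA_le ps rest (res ++ [v])
    simp only [pvRoundA, if_neg hnot]
    simp [pvMeas] at this ⊢; omega

-- the `while len(result) < preview_size and iterators:` loop
def pvLoopA (ps : Int) (res : List (List (String × String)))
    (its : List (List (List (String × String)))) : List (List (String × String)) :=
  if h : (res.length : Int) < ps ∧ its ≠ [] then
    pvLoopA ps (pvRoundA ps res its).1 (pvRoundA ps res its).2
  else res
termination_by pvMeas its
decreasing_by
  obtain ⟨it, rest, rfl⟩ := List.exists_cons_of_ne_nil h.2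
  exact pvMeas_roundA_lt ps it rest res h.1

def round_robin_preview_py (rows : List (List (String × String))) (preview_size : Int) :
    List (List (String × String)) :=
  if rows = [] ∨ preview_size ≤ 0 then []
  else pvLoopA preview_size [] (pvGroupA rows).values

-- ===== PORT B =====
-- `groups.setdefault(row.get("source_file", ""), []).append(row)`
def pvGroupB (rows : List (List (String × String))) : PySem.Dict String (List (List (String × String))) :=
  rows.foldl (fun g row => g.modify (pvRowKey row) [] (· ++ [row])) PySem.Dict.empty

-- inner `for g in gs:` of round k; the Bool flag is the early `return out`
def pvInnerB (ps : Int) (k : Nat) :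
    List (List (List (String × String))) → List (List (String × String)) →
      List (List (String × String)) × Bool
  | [], out => (out, false)
  | g :: rest, out =>
    if h : k < g.length then
      let out' := out ++ [g[k]]
      if (out'.length : Int) = ps then (out', true) else pvInnerB ps k rest out'
    else pvInnerB ps k rest out

-- outer `for k in range(max(len(g) for g in gs)):`
def pvOuterB (ps : Int) (gs : List (List (List (String × String)))) :
    List Nat → List (List (String × String)) → List (List (String × String))
  | [], out => out
  | k :: ks, out =>
    let r := pvInnerB ps k gs out
    if r.2 then r.1 else pvOuterB ps gs ks r.1

def round_robin_preview_py_alt (rows : List (List (String × String))) (preview_size : Int) :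
    List (List (String × String)) :=
  if rows = [] ∨ preview_size ≤ 0 then []
  else
    -- gs = list(groups.values()); out starts empty; range bound = max(len(g) for g in gs)
    pvOuterB preview_size (pvGroupB rows).values
      (List.range (((pvGroupB rows).values.map List.length).foldl max 0)) []

-- ===== PRECONDITION & SPEC =====
def Spec_round_robin_preview_py (rows : List (List (String × String))) (preview_size : Int) (out : List (List (String × String))) : Prop := out = round_robin_preview_py_alt rows preview_size
instance (rows : List (List (String × String))) (preview_size : Int) (out : List (List (String × String))) : Decidable (Spec_round_robin_preview_py rows preview_size out) := by unfold Spec_round_robin_preview_py; infer_instance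

-- ===== CLAIM (what is proved, stated in full; the proofs are below) =====
def Claim_equal_round_robin_preview_py : Prop := ∀ (rows : List (List (String × String))) (preview_size : Int), Dom_round_robin_preview_py rows preview_size → Spec_round_robin_preview_py rows preview_size (round_robin_preview_py rows preview_size)

-- ===== LEMMAS AND PROOFS =====

-- what one round leaves of the iterators
def pvAdv (its : List (List (List (String × String)))) : List (List (List (String × String))) :=
  (its.filter (fun g => g ≠ [])).map List.tail

theorem pvMeas_adv_lt (its : List (List (List (String × String)))) (h : its ≠ []) :
    pvMeas (pvAdv its) < pvMeas its := by
  have hle : ∀ (l : List (List (List (String × String)))),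
      pvMeas (pvAdv l) ≤ (l.map List.length).sum := by
    intro l
    induction l with
    | nil => simp [pvMeas, pvAdv]
    | cons g rest ih =>
      cases g with
      | nil => simpa [pvMeas, pvAdv] using ih
      | cons v vs => simp [pvMeas, pvAdv] at ih ⊢; omega
  have := hle its
  have hlen : 0 < its.length := List.length_pos_of_ne_nil h
  simp [pvMeas] at this ⊢; omega

-- the common intermediate value: whole rounds, flattened
def pvS (its : List (List (List (String × String)))) : List (List (String × String)) :=
  if its = [] then []
  else its.filterMap List.head? ++ pvS (pvAdv its)
termination_by pvMeas its
decreasing_by exact pvMeas_adv_lt its (by assumption)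

theorem pvS_ne (its : List (List (List (String × String)))) (h : ¬ its = []) :
    pvS its = its.filterMap List.head? ++ pvS (pvAdv its) := by
  rw [pvS]; simp [h]

theorem pvAdv_nil_cons (rest : List (List (List (String × String)))) :
    pvAdv ([] :: rest) = pvAdv rest := by simp [pvAdv]

theorem pvAdv_cons_cons (v : List (String × String)) (vs : List (List (String × String)))
    (rest : List (List (List (String × String)))) :
    pvAdv ((v :: vs) :: rest) = vs :: pvAdv rest := by simp [pvAdv]

theorem pvGroup_eq (rows : List (List (String × String))) : pvGroupA rows = pvGroupB rows := by
  unfold pvGroupA pvGroupB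
  congr 1
  funext g row
  by_cases h : g.contains (pvRowKey row)
  · simp only [h, if_true]
    rfl
  · have hc : g.contains (pvRowKey row) = false := by simpa using h
    simp only [hc, Bool.false_eq_true, if_false]
    show (g.insert (pvRowKey row) []).insert (pvRowKey row)
        ((g.insert (pvRowKey row) []).getD (pvRowKey row) [] ++ [row]) = _
    rw [PySem.Dict.getD_insert_self, PySem.Dict.insert_insert_self]
    show g.insert (pvRowKey row) ([] ++ [row]) = _
    have hm : g.modify (pvRowKey row) [] (· ++ [row])
        = g.insert (pvRowKey row) (g.getD (pvRowKey row) [] ++ [row]) := rfl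
    rw [hm, PySem.Dict.getD_of_not_contains g [] hc]

theorem pvRoundA_of_full (ps : Int) (its : List (List (List (String × String))))
    (res : List (List (String × String))) (h : ps ≤ (res.length : Int)) :
    (pvRoundA ps res its).1 = res := by
  cases its with
  | nil => simp [pvRoundA]
  | cons it rest => simp [pvRoundA, h]

theorem pvRoundA_char (ps : Int) :
    ∀ (its : List (List (List (String × String)))) (res : List (List (String × String))),
      (res.length : Int) < ps →
      (pvRoundA ps res its).1 = List.take ps.toNat (res ++ its.filterMap List.head?) ∧
      (((res.length : Int) + (its.filterMap List.head?).length < ps) →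
        (pvRoundA ps res its).2 = pvAdv its) := by
  intro its
  induction its with
  | nil =>
    intro res h
    have : res.length ≤ ps.toNat := by omega
    simp [pvRoundA, pvAdv, List.take_of_length_le this]
  | cons it rest ih =>
    intro res h
    have hnot : ¬ (res.length : Int) ≥ ps := by omega
    cases it with
    | nil =>
      have := ih res h
      simp only [pvRoundA, if_neg hnot]
      rw [pvAdv_nil_cons]
      simpa using this
    | cons v vs =>
      simp only [pvRoundA, if_neg hnot]
      rw [pvAdv_cons_cons]
      by_cases h1 : ((res ++ [v]).length : Int) < ps
      · have := ih (res ++ [v]) h1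
        constructor
        · rw [this.1]; simp
        · intro hlt
          have h2 : (pvRoundA ps (res ++ [v]) rest).2 = pvAdv rest := by
            apply this.2
            simp at hlt ⊢; omega
          simp [h2]
      · -- res ++ [v] already reaches preview_size: the rest of the round is a break
        have hfull : ps ≤ ((res ++ [v]).length : Int) := by omega
        constructor
        · rw [pvRoundA_of_full ps rest (res ++ [v]) hfull]
          have hlen : (res ++ [v]).length = ps.toNat := by simp at hfull ⊢; omega
          have ht : List.take ps.toNat ((res ++ [v]) ++ rest.filterMap List.head?)
              = List.take ps.toNat (res ++ [v]) := List.take_append_of_le_length (by omega)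
          simpa [List.take_of_length_le (le_of_eq hlen)] using ht.symm
        · intro hlt
          exfalso
          simp at hlt hfull
          omega

theorem pvLoopA_eq (ps : Int) :
    ∀ (its : List (List (List (String × String)))) (res : List (List (String × String))),
      (res.length : Int) < ps →
      pvLoopA ps res its = List.take ps.toNat (res ++ pvS its) := by
  intro its
  induction its using pvS.induct with
  | case1 =>
    intro res h
    rw [pvLoopA]
    simp only [ne_eq, not_true_eq_false, and_false, dite_false]
    have : res.length ≤ ps.toNat := by omega
    simp [pvS, List.take_of_length_le this]
  | case2 its hne ih =>
    intro res h
    rw [pvLoopA, dif_pos ⟨h, hne⟩]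
    have hc := pvRoundA_char ps its res h
    by_cases h1 : (res.length : Int) + (its.filterMap List.head?).length < ps
    · have h2 : (pvRoundA ps res its).2 = pvAdv its := hc.2 h1
      have h3 : (pvRoundA ps res its).1 = res ++ its.filterMap List.head? := by
        rw [hc.1]
        apply List.take_of_length_le
        simp at h1 ⊢; omega
      rw [h2, h3, ih (res ++ its.filterMap List.head?) (by simp at h1 ⊢; omega)]
      rw [pvS_ne its hne]
      simp
    · -- the round filled the result: the next loop test fails and returns it unchanged
      have hlen : (pvRoundA ps res its).1.length = ps.toNat := by
        rw [hc.1]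
        simp at h1 ⊢
        omega
      rw [pvLoopA]
      have hstop : ¬ (((pvRoundA ps res its).1.length : Int) < ps
          ∧ (pvRoundA ps res its).2 ≠ []) := by
        rw [hlen]; intro hcontra; omega
      rw [dif_neg hstop, hc.1, pvS_ne its hne, ← List.append_assoc]
      refine (List.take_append_of_le_length ?_).symm
      simp at h1 ⊢; omega

theorem pvInnerB_eq (ps : Int) (k : Nat) :
    ∀ (gs : List (List (List (String × String)))) (out : List (List (String × String))),
      (out.length : Int) < ps →
      pvInnerB ps k gs out =
        (List.take ps.toNat (out ++ gs.filterMap (fun g => g[k]?)),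
         decide (ps ≤ (out.length : Int) + (gs.filterMap (fun g => g[k]?)).length)) := by
  intro gs
  induction gs with
  | nil =>
    intro out h
    have : out.length ≤ ps.toNat := by omega
    simp [pvInnerB, List.take_of_length_le this]
    omega
  | cons g rest ih =>
    intro out h
    by_cases hk : k < g.length
    · have hg : g[k]? = some g[k] := List.getElem?_eq_getElem hk
      by_cases hdone : ((out ++ [g[k]]).length : Int) = ps
      · have hlen : (out ++ [g[k]]).length = ps.toNat := by simp at hdone ⊢; omega
        simp only [pvInnerB, dif_pos hk, if_pos hdone, hg, List.filterMap_cons,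
          Prod.mk.injEq]
        refine ⟨?_, ?_⟩
        · have ht : List.take ps.toNat ((out ++ [g[k]]) ++ rest.filterMap (fun g => g[k]?))
              = List.take ps.toNat (out ++ [g[k]]) := List.take_append_of_le_length (by omega)
          rw [List.take_of_length_le (le_of_eq hlen)] at ht
          simpa using ht.symm
        · have hP : ps ≤ (out.length : Int)
              + ((g[k] :: rest.filterMap (fun g => g[k]?)).length : Int) := by
            simp only [List.length_append, List.length_cons, List.length_nil] at hdone ⊢
            push_cast at hdone ⊢
            omega
          exact (decide_eq_true hP).symm
      · have h1 : ((out ++ [g[k]]).length : Int) < ps := by simp at hdone ⊢; omega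
        simp only [pvInnerB, dif_pos hk, if_neg hdone]
        rw [ih (out ++ [g[k]]) h1]
        simp only [hg, List.filterMap_cons, Prod.mk.injEq]
        refine ⟨by simp, ?_⟩
        rw [decide_eq_decide]
        simp only [List.length_append, List.length_cons, List.length_nil]
        push_cast
        constructor <;> (intro; omega)
    · have hg : g[k]? = none := List.getElem?_eq_none (by omega)
      simp only [pvInnerB, dif_neg hk]
      rw [ih out h]
      simp [hg]

theorem pvOuterB_eq (ps : Int) (gs : List (List (List (String × String)))) :
    ∀ (ks : List Nat) (out : List (List (String × String))),
      (out.length : Int) < ps →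
      pvOuterB ps gs ks out =
        List.take ps.toNat (out ++ ks.flatMap (fun k => gs.filterMap (fun g => g[k]?))) := by
  intro ks
  induction ks with
  | nil =>
    intro out h
    have : out.length ≤ ps.toNat := by omega
    simp [pvOuterB, List.take_of_length_le this]
  | cons k ks ih =>
    intro out h
    simp only [pvOuterB]
    rw [pvInnerB_eq ps k gs out h]
    by_cases hfull : ps ≤ (out.length : Int) + (gs.filterMap (fun g => g[k]?)).length
    · simp only [hfull, decide_true, if_true]
      rw [List.flatMap_cons, ← List.append_assoc]
      refine (List.take_append_of_le_length ?_).symm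
      simp at hfull ⊢; omega
    · simp only [hfull, decide_false, Bool.false_eq_true, if_false]
      have hsh : List.take ps.toNat (out ++ gs.filterMap (fun g => g[k]?))
          = out ++ gs.filterMap (fun g => g[k]?) :=
        List.take_of_length_le (by simp at hfull ⊢; omega)
      rw [hsh, ih _ (by simp at hfull ⊢; omega)]
      simp [List.flatMap_cons]

theorem pvFoldlMax_init : ∀ (l : List Nat) (a : Nat), a ≤ l.foldl max a := by
  intro l
  induction l with
  | nil => simp
  | cons x t ih => intro a; exact le_trans (le_max_left a x) (ih (max a x))

theorem pvFoldlMax_le : ∀ (l : List Nat) (a x : Nat), x ∈ l → x ≤ l.foldl max a := by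
  intro l
  induction l with
  | nil => simp
  | cons y t ih =>
    intro a x hx
    rcases List.mem_cons.mp hx with rfl | hx
    · exact le_trans (le_max_right a x) (pvFoldlMax_init t (max a x))
    · exact ih (max a y) x hx

theorem pvShift (k : Nat) :
    ∀ (its : List (List (List (String × String)))),
      its.filterMap (fun g => g[k + 1]?) = (pvAdv its).filterMap (fun g => g[k]?) := by
  intro its
  induction its with
  | nil => rfl
  | cons g rest ih =>
    cases g with
    | nil =>
      rw [pvAdv_nil_cons]
      simpa [List.filterMap_cons] using ih
    | cons v vs =>
      rw [pvAdv_cons_cons]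
      simp only [List.filterMap_cons, List.getElem?_cons_succ, ih]

theorem pvFlat_eq_S :
    ∀ (N : Nat) (its : List (List (List (String × String)))),
      (∀ g ∈ its, g.length ≤ N) →
      (List.range N).flatMap (fun k => its.filterMap (fun g => g[k]?)) = pvS its := by
  intro N
  induction N with
  | zero =>
    intro its hN
    have hnil : ∀ g ∈ its, g = [] := by
      intro g hg; exact List.eq_nil_of_length_eq_zero (Nat.le_zero.mp (hN g hg))
    have h1 : its.filterMap List.head? = [] := by
      rw [List.filterMap_eq_nil_iff]
      intro g hg; rw [hnil g hg]; rfl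
    have h2 : pvAdv its = [] := by
      have hf : its.filter (fun g => g ≠ []) = [] := by
        rw [List.filter_eq_nil_iff]
        intro a ha
        simpa using hnil a ha
      simp only [pvAdv]
      rw [hf]
      simp
    by_cases h : its = []
    · simp [h, pvS]
    · rw [pvS_ne its h, h1, h2]
      simp [pvS]
  | succ N ih =>
    intro its hN
    rw [List.range_succ_eq_map, List.flatMap_cons, List.flatMap_map]
    have hz : its.filterMap (fun g => g[0]?) = its.filterMap List.head? := by
      congr 1
      funext g
      exact (List.head?_eq_getElem?).symm
    have hb : ∀ g ∈ pvAdv its, g.length ≤ N := by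
      intro g hg
      rcases List.mem_map.mp hg with ⟨g', hg', rfl⟩
      have := hN g' (List.mem_of_mem_filter hg')
      cases g' with
      | nil => simp
      | cons a b => simp at this ⊢; omega
    have hrest :
        (List.range N).flatMap (fun k => its.filterMap (fun g => g[k + 1]?)) =
          pvS (pvAdv its) := by
      rw [← ih (pvAdv its) hb]
      congr 1
      funext k
      exact pvShift k its
    by_cases h : its = []
    · subst h
      simp [pvAdv] at hrest
      simp [pvS, hrest]
    · rw [hz, pvS_ne its h]
      congr 1

-- ===== VERDICT (by name: the statement is the Claim_ definition above) =====
theorem round_robin_preview_py_spec : Claim_equal_round_robin_preview_py := by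
  unfold Claim_equal_round_robin_preview_py Spec_round_robin_preview_py
  intro rows ps _
  unfold round_robin_preview_py round_robin_preview_py_alt
  by_cases hguard : rows = [] ∨ ps ≤ 0
  · simp [hguard]
  · rw [if_neg hguard, if_neg hguard]
    have hps : (0 : Int) < ps := by
      rcases not_or.mp hguard with ⟨_, h2⟩; omega
    have hbound : ∀ g ∈ (pvGroupB rows).values,
        g.length ≤ ((pvGroupB rows).values.map List.length).foldl max 0 :=
      fun g hg => pvFoldlMax_le _ 0 g.length (List.mem_map.mpr ⟨g, hg, rfl⟩)
    rw [pvGroup_eq, pvLoopA_eq ps (pvGroupB rows).values [] (by simpa using hps),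
      pvOuterB_eq ps (pvGroupB rows).values (List.range _) [] (by simpa using hps),
      pvFlat_eq_S _ (pvGroupB rows).values hbound]
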